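-- pv_equiv track=rewrite | github.com/olvorf/algorithms_and_datastructures | Data_Structures/week3_hash_tables/4_substring_equality/rabin_karp_2.py | precomputedhash
-- ===== SOURCE A (Python) =====
-- def polyhash(string, prime, d ):
--     hash = 0
--     for i in range(len(string)-1,-1,-1):
--         hash = (hash*d + ord(string[i])) % prime
--     return hash
--
-- def precomputedhash(T, P, prime, d):
--     t = len(T)
--     p = len(P)
--     s = T[t-p:]
--     H = list([] for _ in range(t - p + 1))
--     H[t-p] = polyhash(s, prime, d)
--     y = 1
--     for i in range(1,p+1):
--         y = (y*d) % prime
--     for i in range(t-p-1, -1, -1):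
--         H[i] = (d*H[i+1] + ord(T[i]) - y*ord(T[i + p])) % prime
--     return H
-- ===== SOURCE B (Python) =====
-- def window_hash(s, prime, d):
--     h = 0
--     for c in reversed(s):
--         h = (h * d + ord(c)) % prime
--     return h
--
-- def precomputedhash(T, P, prime, d):
--     t, p = len(T), len(P)
--     return [window_hash(T[i:i + p], prime, d) for i in range(t - p + 1)]
-- ===== Notes on version B (the rewrite author's own statement) =====
-- stated objective: simpler
-- what changed: Replaced the rolling-hash recurrence (with its precomputed d^p power and in-place table updates) by a plain comprehension that recomputes each window's polynomial hash independently from its characters.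
import Mathlib
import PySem

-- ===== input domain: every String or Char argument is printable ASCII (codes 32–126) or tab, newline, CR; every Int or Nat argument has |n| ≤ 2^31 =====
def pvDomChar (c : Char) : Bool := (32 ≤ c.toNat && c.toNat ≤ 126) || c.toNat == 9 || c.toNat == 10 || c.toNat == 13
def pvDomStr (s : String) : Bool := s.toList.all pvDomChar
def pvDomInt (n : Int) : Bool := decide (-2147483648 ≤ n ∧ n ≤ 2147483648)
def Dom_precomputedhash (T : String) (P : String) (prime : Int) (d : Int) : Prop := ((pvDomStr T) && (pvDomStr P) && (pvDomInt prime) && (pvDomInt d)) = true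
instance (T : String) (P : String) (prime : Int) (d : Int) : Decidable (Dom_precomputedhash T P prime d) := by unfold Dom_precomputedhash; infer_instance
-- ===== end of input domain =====

-- B replaces A's rolling-hash recurrence by independently recomputing each window's
-- polynomial hash (simpler: a plain comprehension, no d^p power, no table updates).


-- ===== PORT A =====
-- polyhash: hash = 0; for i in range(len(string)-1,-1,-1): hash = (hash*d + ord(string[i])) % prime
-- (ord c = c.toNat, the code point — exact; indices produced by the range are always in bounds, so pyGetD's default is never used)
def pvPolyhashA (s : List Char) (prime : Int) (d : Int) : Int :=
  (PySem.List.pyRange ((s.length : Int) - 1) (-1) (-1)).foldl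
    (fun h i => PySem.Int.mod (h * d + ((PySem.List.pyGetD s i ' ').toNat : Int)) prime) 0

-- H is initialised in Python with placeholder [] entries that are overwritten before being
-- read (under Pre_); the port uses placeholder 0 for the same never-read slots.
def precomputedhash (T : String) (P : String) (prime : Int) (d : Int) : List Int :=
  let Tl := T.toList
  let t : Int := Tl.length
  let p : Int := P.toList.length
  let s := PySem.List.slice Tl (some (t - p)) none
  let H0 : List Int := List.replicate (t - p + 1).toNat 0
  let H1 := H0.set (t - p).toNat (pvPolyhashA s prime d)
  let y := (PySem.List.pyRange 1 (p + 1) 1).foldl (fun y _ => PySem.Int.mod (y * d) prime) 1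
  (PySem.List.pyRange (t - p - 1) (-1) (-1)).foldl
    (fun H i => H.set i.toNat
      (PySem.Int.mod (d * H.getD (i + 1).toNat 0
        + ((PySem.List.pyGetD Tl i ' ').toNat : Int)
        - y * ((PySem.List.pyGetD Tl (i + p) ' ').toNat : Int)) prime)) H1

-- ===== PORT B =====
-- window_hash: h = 0; for c in reversed(s): h = (h*d + ord(c)) % prime
def pvWindowHash (s : List Char) (prime : Int) (d : Int) : Int :=
  s.reverse.foldl (fun h c => PySem.Int.mod (h * d + (c.toNat : Int)) prime) 0

def precomputedhash_alt (T : String) (P : String) (prime : Int) (d : Int) : List Int :=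
  let Tl := T.toList
  let t : Int := Tl.length
  let p : Int := P.toList.length
  (PySem.List.pyRange 0 (t - p + 1) 1).map
    (fun i => pvWindowHash (PySem.List.slice Tl (some i) (some (i + p))) prime d)

-- ===== PRECONDITION & SPEC =====
-- A raises IndexError when len(P) > len(T) (H[t-p] on an empty table) and ZeroDivisionError
-- when prime = 0 unless no '%' is ever executed (only when len(T) = 0, hence len(P) = 0).
def Pre_precomputedhash (T : String) (P : String) (prime : Int) (d : Int) : Prop :=
  PySem.Str.len P ≤ PySem.Str.len T ∧ (prime ≠ 0 ∨ PySem.Str.len T = 0)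
instance (T : String) (P : String) (prime : Int) (d : Int) : Decidable (Pre_precomputedhash T P prime d) := by unfold Pre_precomputedhash; infer_instance

def pvWitness_precomputedhash : String × String × Int × Int := ("abc", "ab", 7, 3)

def Spec_precomputedhash (T : String) (P : String) (prime : Int) (d : Int) (out : List Int) : Prop := out = precomputedhash_alt T P prime d
instance (T : String) (P : String) (prime : Int) (d : Int) (out : List Int) : Decidable (Spec_precomputedhash T P prime d out) := by unfold Spec_precomputedhash; infer_instance

-- ===== CLAIM (what is proved, stated in full; the proofs are below) =====
def Claim_equal_precomputedhash : Prop := ∀ (T : String) (P : String) (prime : Int) (d : Int), Dom_precomputedhash T P prime d → Pre_precomputedhash T P prime d → Spec_precomputedhash T P prime d (precomputedhash T P prime d)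

-- ===== LEMMAS AND PROOFS =====

-- PySem.Int.mod is Python's % = Int.fmod (definitional bridge used throughout)
lemma pvModEqFmod (a b : Int) : PySem.Int.mod a b = a.fmod b := rfl

-- the exact polynomial value of a window: sum of ord s[i] * d^i
def pvV (d : Int) : List Char -> Int
  | [] => 0
  | c :: s => (c.toNat : Int) + d * pvV d s

-- the hash B computes for the window of length p starting at k
def pvW (Tl : List Char) (p : Nat) (q d : Int) (k : Nat) : Int :=
  pvWindowHash ((Tl.drop k).take p) q d

lemma pvV_append_singleton (d : Int) (s : List Char) (x : Char) :
    pvV d (s ++ [x]) = pvV d s + (x.toNat : Int) * d ^ s.length := by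
  induction s with
  | nil => simp [pvV]
  | cons c s ih =>
    simp only [List.cons_append, pvV, ih, List.length_cons]
    ring

lemma pvFmod_modEq (a q : Int) : Int.ModEq q (a.fmod q) a := by
  unfold Int.ModEq
  rw [Int.fmod_eq_emod]
  split_ifs with h
  · simp
  · simp [Int.add_emod_right]

lemma pvFmodCongr {q a b : Int} (h : Int.ModEq q a b) : a.fmod q = b.fmod q := by
  have h' : a % q = b % q := h
  have hd : (q ∣ a) ↔ (q ∣ b) := by
    rw [Int.dvd_iff_emod_eq_zero, Int.dvd_iff_emod_eq_zero, h']
  rw [Int.fmod_eq_emod, Int.fmod_eq_emod, h']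
  by_cases h0 : 0 ≤ q
  · simp [h0]
  · simp only [hd]

lemma pvWindowHash_eq (s : List Char) (q d : Int) :
    pvWindowHash s q d = (pvV d s).fmod q := by
  unfold pvWindowHash
  rw [List.foldl_reverse]
  induction s with
  | nil => simp [pvV]
  | cons c s ih =>
    simp only [List.foldr_cons]
    rw [ih]
    simp only [pvModEqFmod, pvV]
    apply pvFmodCongr
    have h1 : Int.ModEq q ((pvV d s).fmod q * d) (pvV d s * d) :=
      (pvFmod_modEq (pvV d s) q).mul_right d
    have h2 := h1.add_right ((c.toNat : Int))
    have e : pvV d s * d + (c.toNat : Int) = (c.toNat : Int) + d * pvV d s := by ring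
    rw [e] at h2
    exact h2

lemma pvPolyhashA_eq (s : List Char) (q d : Int) :
    pvPolyhashA s q d = pvWindowHash s q d := by
  have hrev : s.reverse = (List.range s.length).map (fun k => s.getD (s.length - 1 - k) ' ') := by
    apply List.ext_getElem
    · simp
    · intro i h1 h2
      have hi : i < s.length := by simpa using h1
      simp only [List.getElem_reverse, List.getElem_map, List.getElem_range]
      rw [List.getD_eq_getElem s ' ' (by omega)]
  unfold pvPolyhashA pvWindowHash
  rw [hrev, PySem.List.pyRange_neg_one]
  have harg : ((s.length : Int) - 1 - (-1)).toNat = s.length := by omega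
  rw [harg, List.foldl_map, List.foldl_map]
  apply PySem.List.foldl_congr_mem
  intro acc k hk
  rw [List.mem_range] at hk
  have e : (s.length : Int) - 1 - (k : Int) = ((s.length - 1 - k : Nat) : Int) := by omega
  rw [e, PySem.List.pyGetD_natCast]

lemma pvY_modEq (q d : Int) (l : List Int) (a : Int) :
    Int.ModEq q (l.foldl (fun y _ => PySem.Int.mod (y * d) q) a) (a * d ^ l.length) := by
  induction l generalizing a with
  | nil => simp
  | cons x l ih =>
    simp only [List.foldl_cons, List.length_cons, pvModEqFmod]
    calc l.foldl (fun y _ => PySem.Int.mod (y * d) q) ((a * d).fmod q)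
        ≡ (a * d).fmod q * d ^ l.length [ZMOD q] := ih _
      _ ≡ (a * d) * d ^ l.length [ZMOD q] :=
          Int.ModEq.mul_right _ (pvFmod_modEq (a * d) q)
      _ = a * d ^ (l.length + 1) := by ring

lemma pvV_roll (Tl : List Char) (p j : Nat) (d : Int) (h : j + p < Tl.length) :
    pvV d ((Tl.drop j).take p)
      = ((Tl.getD j ' ').toNat : Int) + d * pvV d ((Tl.drop (j + 1)).take p)
        - ((Tl.getD (j + p) ' ').toNat : Int) * d ^ p := by
  cases p with
  | zero =>
    simp only [List.take_zero, pvV, pow_zero, Nat.add_zero]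
    ring
  | succ pp =>
    have hj : j < Tl.length := by omega
    have hjp : j + 1 + pp < Tl.length := by omega
    rw [List.getD_eq_getElem Tl ' ' hj, List.getD_eq_getElem Tl ' ' (by omega : j + (pp + 1) < Tl.length)]
    rw [List.drop_eq_getElem_cons hj, List.take_succ_cons]
    have hlast : (Tl.drop (j + 1)).take (pp + 1)
        = (Tl.drop (j + 1)).take pp ++ [Tl[j + 1 + pp]] := by
      rw [List.take_add_one]
      congr 1
      rw [List.getElem?_drop, List.getElem?_eq_getElem hjp]
      rfl
    have hlen : ((Tl.drop (j + 1)).take pp).length = pp := by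
      simp only [List.length_take, List.length_drop]
      omega
    rw [hlast, pvV_append_singleton, hlen]
    have hget : Tl[j + 1 + pp] = Tl[j + (pp + 1)]'(by omega) := by
      congr 1
      omega
    rw [hget]
    simp only [pvV]
    ring

lemma pvW_step (Tl : List Char) (p j : Nat) (q d y : Int)
    (hj : j + p < Tl.length) (hy : Int.ModEq q y (d ^ p)) :
    pvW Tl p q d j
      = (d * pvW Tl p q d (j + 1) + ((Tl.getD j ' ').toNat : Int)
          - y * ((Tl.getD (j + p) ' ').toNat : Int)).fmod q := by
  unfold pvW
  rw [pvWindowHash_eq, pvWindowHash_eq]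
  apply pvFmodCongr
  rw [pvV_roll Tl p j d hj]
  have h1 : Int.ModEq q (d * (pvV d ((Tl.drop (j + 1)).take p)).fmod q)
      (d * pvV d ((Tl.drop (j + 1)).take p)) :=
    (pvFmod_modEq _ q).mul_left d
  have h2 := (h1.add_right ((Tl.getD j ' ').toNat : Int)).sub
    (hy.mul_right ((Tl.getD (j + p) ' ').toNat : Int))
  have e : d * pvV d ((Tl.drop (j + 1)).take p) + ((Tl.getD j ' ').toNat : Int)
      - d ^ p * ((Tl.getD (j + p) ' ').toNat : Int)
      = ((Tl.getD j ' ').toNat : Int) + d * pvV d ((Tl.drop (j + 1)).take p)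
        - ((Tl.getD (j + p) ' ').toNat : Int) * d ^ p := by ring
  rw [e] at h2
  exact h2.symm

lemma pvInit (m : Nat) (W : Nat -> Int) :
    (List.replicate (m + 1) 0).set m (W m)
      = (List.range (m + 1)).map (fun k => if m ≤ k then W k else 0) := by
  apply List.ext_getElem
  · simp
  · intro i h1 h2
    have hi : i < m + 1 := by simpa using h1
    simp only [List.getElem_set, List.getElem_replicate, List.getElem_map, List.getElem_range]
    by_cases h : m = i
    · subst h; simp
    · rw [if_neg h, if_neg (by omega)]

lemma pvSetMap (m j : Nat) (W : Nat -> Int) (hj : j < m + 1) :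
    ((List.range (m + 1)).map (fun k => if j + 1 ≤ k then W k else 0)).set j (W j)
      = (List.range (m + 1)).map (fun k => if j ≤ k then W k else 0) := by
  apply List.ext_getElem
  · simp
  · intro i h1 h2
    have hi : i < m + 1 := by simpa using h2
    simp only [List.getElem_set, List.getElem_map, List.getElem_range]
    by_cases h : j = i
    · subst h; simp
    · rw [if_neg h]
      have e : (j + 1 ≤ i) ↔ (j ≤ i) := by omega
      simp only [e]

lemma pvA_loop (Tl : List Char) (p : Nat) (q d y : Int) (m : Nat)
    (hm : m + p = Tl.length) (hy : Int.ModEq q y (d ^ p)) :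
    ∀ j, j ≤ m →
      ((List.range j).map (fun k : Nat => ((j : Int) - 1 - (k : Int)))).foldl
        (fun H i => H.set i.toNat
          (PySem.Int.mod (d * H.getD (i + 1).toNat 0
            + ((PySem.List.pyGetD Tl i ' ').toNat : Int)
            - y * ((PySem.List.pyGetD Tl (i + (p : Int)) ' ').toNat : Int)) q))
        ((List.range (m + 1)).map (fun k => if j ≤ k then pvW Tl p q d k else 0))
      = (List.range (m + 1)).map (pvW Tl p q d) := by
  intro j
  induction j with
  | zero => intro _; simp
  | succ j ih =>
    intro hj
    have hdesc : (List.range (j + 1)).map (fun k : Nat => (((j + 1 : Nat) : Int) - 1 - (k : Int)))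
        = ((j : Nat) : Int) :: (List.range j).map (fun k : Nat => ((j : Int) - 1 - (k : Int))) := by
      rw [List.range_succ_eq_map, List.map_cons, List.map_map]
      congr 1
      · push_cast; ring
      · apply List.map_congr_left
        intro k _
        simp only [Function.comp_apply]
        push_cast; ring
    rw [hdesc, List.foldl_cons]
    have hstep :
        ((List.range (m + 1)).map (fun k => if j + 1 ≤ k then pvW Tl p q d k else 0)).set
            ((j : Int)).toNat
            (PySem.Int.mod (d * ((List.range (m + 1)).map
                (fun k => if j + 1 ≤ k then pvW Tl p q d k else 0)).getD (((j : Int)) + 1).toNat 0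
              + ((PySem.List.pyGetD Tl ((j : Int)) ' ').toNat : Int)
              - y * ((PySem.List.pyGetD Tl (((j : Int)) + (p : Int)) ' ').toNat : Int)) q)
          = (List.range (m + 1)).map (fun k => if j ≤ k then pvW Tl p q d k else 0) := by
      have e1 : (((j : Int)) + 1).toNat = j + 1 := by omega
      have e2 : ((j : Int)).toNat = j := by omega
      have e3 : ((j : Int)) + (p : Int) = ((j + p : Nat) : Int) := by push_cast; ring
      rw [e1, e2, e3, PySem.List.pyGetD_natCast, PySem.List.pyGetD_natCast]
      rw [PySem.List.getD_map_range _ _ _ _ (by omega)]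
      rw [if_pos (le_refl (j + 1))]
      rw [pvModEqFmod, ← pvW_step Tl p j q d y (by omega) hy]
      exact pvSetMap m j (pvW Tl p q d) (by omega)
    rw [hstep]
    exact ih (by omega)

theorem pvMain (T P : String) (q d : Int) (hp : P.toList.length ≤ T.toList.length) :
    precomputedhash T P q d = precomputedhash_alt T P q d := by
  unfold precomputedhash precomputedhash_alt
  dsimp only []
  obtain ⟨m, hm⟩ : ∃ m : Nat, m + P.toList.length = T.toList.length := ⟨_, Nat.sub_add_cancel hp⟩
  have e0 : ((T.toList.length : Int) - (P.toList.length : Int)) = ((m : Nat) : Int) := by omega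
  -- y is congruent to d ^ p
  have hylen : (PySem.List.pyRange 1 ((P.toList.length : Int) + 1) 1).length = P.toList.length := by
    rw [PySem.List.length_pyRange_one]
    omega
  have hy : Int.ModEq q
      ((PySem.List.pyRange 1 ((P.toList.length : Int) + 1) 1).foldl
        (fun y _ => PySem.Int.mod (y * d) q) 1)
      (d ^ P.toList.length) := by
    have := pvY_modEq q d (PySem.List.pyRange 1 ((P.toList.length : Int) + 1) 1) 1
    rw [hylen, one_mul] at this
    exact this
  have hlastwin : (T.toList.drop m).take P.toList.length = T.toList.drop m := by
    apply List.take_of_length_le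
    simp only [List.length_drop]
    omega
  -- A side
  rw [e0, PySem.List.slice_from_natCast,
    show (((m : Nat) : Int) + 1).toNat = m + 1 by omega,
    show (((m : Nat) : Int)).toNat = m by omega,
    PySem.List.pyRange_neg_one,
    show (((m : Nat) : Int) - 1 - (-1)).toNat = m by omega]
  have hinit : (List.replicate (m + 1) 0).set m
      (pvPolyhashA (T.toList.drop m) q d)
      = (List.range (m + 1)).map (fun k => if m ≤ k then pvW T.toList P.toList.length q d k else 0) := by
    rw [pvPolyhashA_eq, show pvWindowHash (T.toList.drop m) q d = pvW T.toList P.toList.length q d m by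
      unfold pvW; rw [hlastwin]]
    exact pvInit m (pvW T.toList P.toList.length q d)
  rw [hinit]
  rw [pvA_loop T.toList P.toList.length q d _ m hm hy m (le_refl m)]
  -- B side
  rw [show (((m : Nat) : Int) + 1) = ((m + 1 : Nat) : Int) by push_cast; ring,
    PySem.List.pyRange_zero_natCast, List.map_map]
  apply List.map_congr_left
  intro k _
  simp only [Function.comp_apply]
  rw [PySem.List.slice_natCast_add]
  rfl

-- ===== VERDICT (by name: the statement is the Claim_ definition above) =====
theorem precomputedhash_spec : Claim_equal_precomputedhash := by
  intro T P prime d _ hpre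
  unfold Spec_precomputedhash
  obtain ⟨hpl, -⟩ := hpre
  rw [PySem.Str.len_eq, PySem.Str.len_eq] at hpl
  exact pvMain T P prime d (by exact_mod_cast hpl)
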